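-- pv_equiv track=rewrite | github.com/andy0013/tp2guarna | TextoSuministradoYDicc V2.py | CrearDicc
-- ===== SOURCE A (Python) =====
-- def CrearDicc(validas, palabras):
--     dicc = {}
--     for n in validas:
--         dicc[n] = 0
--     for i in palabras:
--         if i in dicc:
--             dicc[i] += 1
--     return dicc
-- ===== SOURCE B (Python) =====
-- def CrearDicc(validas, palabras):
--     # For each valid word, count its occurrences by a direct scan of palabras:
--     # no counting dict is maintained at all.
--     return {n: palabras.count(n) for n in validas}
-- ===== Notes on version B (the rewrite author's own statement) =====
-- stated objective: simpler
-- what changed: B is a one-line dict comprehension that counts each valid word by a direct list.count scan of palabras, instead of A's zero-initialised dict incrementally updated by a membership-guarded loop over palabras; no counting state is threaded through any loop.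
import Mathlib
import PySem

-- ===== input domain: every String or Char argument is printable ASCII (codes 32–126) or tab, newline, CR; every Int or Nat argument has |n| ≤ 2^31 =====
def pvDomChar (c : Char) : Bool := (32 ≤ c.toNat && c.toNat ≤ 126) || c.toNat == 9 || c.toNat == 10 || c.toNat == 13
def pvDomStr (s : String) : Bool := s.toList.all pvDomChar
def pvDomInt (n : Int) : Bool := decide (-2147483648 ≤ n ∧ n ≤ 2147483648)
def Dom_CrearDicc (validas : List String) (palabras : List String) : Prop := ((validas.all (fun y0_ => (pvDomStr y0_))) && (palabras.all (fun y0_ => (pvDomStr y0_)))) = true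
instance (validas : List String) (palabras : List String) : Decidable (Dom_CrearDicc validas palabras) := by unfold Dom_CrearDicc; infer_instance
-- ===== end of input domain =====

-- B replaces A's incrementally-updated counting dict with a one-line dict comprehension
-- that counts each valid word by a direct scan of palabras (simpler; quadratic, not claimed faster).


-- ===== PORT A =====
def CrearDicc (validas : List String) (palabras : List String) : List (String × Int) :=
  -- dicc = {}; for n in validas: dicc[n] = 0
  let dicc0 : PySem.Dict String Int :=
    validas.foldl (fun d n => d.insert n 0) PySem.Dict.empty
  -- for i in palabras: if i in dicc: dicc[i] += 1
  let dicc : PySem.Dict String Int :=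
    palabras.foldl (fun d i => if d.contains i then d.modify i 0 (· + 1) else d) dicc0
  dicc.items

-- ===== PORT B =====
def CrearDicc_alt (validas : List String) (palabras : List String) : List (String × Int) :=
  -- {n: palabras.count(n) for n in validas}
  (validas.foldl (fun d n => d.insert n (PySem.List.count palabras n : Int)) PySem.Dict.empty).items

-- ===== PRECONDITION & SPEC =====
def Spec_CrearDicc (validas : List String) (palabras : List String) (out : List (String × Int)) : Prop := out = CrearDicc_alt validas palabras
instance (validas : List String) (palabras : List String) (out : List (String × Int)) : Decidable (Spec_CrearDicc validas palabras out) := by unfold Spec_CrearDicc; infer_instance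

-- ===== CLAIM (what is proved, stated in full; the proofs are below) =====
def Claim_equal_CrearDicc : Prop := ∀ (validas : List String) (palabras : List String), Dom_CrearDicc validas palabras → Spec_CrearDicc validas palabras (CrearDicc validas palabras)

-- ===== LEMMAS AND PROOFS =====

-- The guarded counting loop of A keeps the key list unchanged.
lemma keys_guardFold (l : List String) (d : PySem.Dict String Int) :
    (l.foldl (fun d i => if d.contains i then d.modify i 0 (· + 1) else d) d).keys = d.keys := by
  induction l generalizing d with
  | nil => rfl
  | cons i l ih =>
    simp only [List.foldl_cons]
    by_cases h : d.contains i = true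
    · rw [if_pos h, ih]
      simp [PySem.Dict.keys_modify, PySem.Dict.keys_insert_of_contains, h]
    · rw [if_neg h, ih]

-- Value of a key present in d after A's guarded counting loop: old value plus the count.
lemma getD_guardFold (l : List String) (d : PySem.Dict String Int) (v : String)
    (hv : d.contains v = true) :
    (l.foldl (fun d i => if d.contains i then d.modify i 0 (· + 1) else d) d).getD v 0
      = d.getD v 0 + l.count v := by
  induction l generalizing d with
  | nil => simp
  | cons i l ih =>
    simp only [List.foldl_cons, List.count_cons]
    by_cases h : d.contains i = true
    · rw [if_pos h]
      have hv' : (d.modify i 0 (· + 1)).contains v = true := by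
        rw [PySem.Dict.contains_modify]; simp [hv]
      rw [ih _ hv', PySem.Dict.getD_modify]
      by_cases hvi : v = i
      · simp [hvi]; ring
      · have hiv : ¬ i = v := fun e => hvi e.symm
        simp [hvi, hiv, beq_iff_eq]
    · rw [if_neg h, ih _ hv]
      have hvi : i ≠ v := fun e => h (e ▸ hv)
      simp [hvi, beq_iff_eq]

-- After the zero-initialisation loop every lookup with default 0 is 0.
lemma getD_zeroFold (l : List String) (d : PySem.Dict String Int) (v : String)
    (hd : d.getD v 0 = 0) :
    (l.foldl (fun d n => d.insert n 0) d).getD v 0 = 0 := by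
  induction l generalizing d with
  | nil => exact hd
  | cons n l ih =>
    simp only [List.foldl_cons]
    apply ih
    rw [PySem.Dict.getD_insert]
    split <;> simp [hd]

-- Lookup after B's comprehension loop (value depends only on the key).
lemma getD_projFold (l : List String) (d : PySem.Dict String Int) (f : String → Int) (v : String) :
    (l.foldl (fun d n => d.insert n (f n)) d).getD v 0
      = if v ∈ l then f v else d.getD v 0 := by
  induction l generalizing d with
  | nil => simp
  | cons n l ih =>
    simp only [List.foldl_cons, ih, PySem.Dict.getD_insert, List.mem_cons]
    by_cases hvl : v ∈ l
    · simp [hvl]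
    · by_cases hvn : v = n <;> simp [hvl, hvn]

-- ===== VERDICT (by name: the statement is the Claim_ definition above) =====
theorem CrearDicc_spec : Claim_equal_CrearDicc := by
  intro validas palabras _
  unfold Spec_CrearDicc CrearDicc CrearDicc_alt
  simp only
  set dicc0 : PySem.Dict String Int :=
    validas.foldl (fun d n => d.insert n 0) PySem.Dict.empty with hd0
  set diccA : PySem.Dict String Int :=
    palabras.foldl (fun d i => if d.contains i then d.modify i 0 (· + 1) else d) dicc0 with hdA
  set diccB : PySem.Dict String Int :=
    validas.foldl (fun d n => d.insert n (PySem.List.count palabras n : Int)) PySem.Dict.empty with hdB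
  have hk0 : dicc0.keys = PySem.Set.ofList validas := by
    rw [hd0, PySem.Dict.keys_foldl_insert, PySem.Dict.keys_empty]
    rfl
  have hkA : diccA.keys = PySem.Set.ofList validas := by
    rw [hdA, keys_guardFold, hk0]
  have hkB : diccB.keys = PySem.Set.ofList validas := by
    rw [hdB, PySem.Dict.keys_foldl_insert, PySem.Dict.keys_empty]
    rfl
  have hnA : diccA.keys.Nodup := by rw [hkA]; exact PySem.Set.nodup_ofList _
  have hnB : diccB.keys.Nodup := by rw [hkB]; exact PySem.Set.nodup_ofList _
  rw [PySem.Dict.items_eq_map_keys diccA hnA 0, PySem.Dict.items_eq_map_keys diccB hnB 0,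
      hkA, hkB]
  apply List.map_congr_left
  intro k hk
  have hkval : k ∈ validas := (PySem.Set.mem_ofList (xs := validas) (y := k)).mp hk
  have hcont : dicc0.contains k = true := by
    rw [PySem.Dict.contains_iff_mem_keys, hk0]
    exact hk
  have h0 : dicc0.getD k 0 = 0 := by
    rw [hd0]
    exact getD_zeroFold _ _ _ (by simp)
  have hA : diccA.getD k 0 = palabras.count k := by
    rw [hdA, getD_guardFold _ _ _ hcont, h0, zero_add]
  have hB : diccB.getD k 0 = palabras.count k := by
    rw [hdB, getD_projFold, if_pos hkval, PySem.List.count_eq]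
  rw [hA, hB]
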